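-- pv_equiv track=rewrite | github.com/RobertLeGrange/adventofcode2022 | Day5/main.py | stackloader
-- ===== SOURCE A (Python) =====
-- def stackloader(stacklines, positions):
--     stacks = []
--     stack = []
--     for position in positions:
--         for line in reversed(stacklines):
--             for str in line[position]:
--                 if str.isalpha():
--                     stack.append(str)
--         stacks.append(stack)
--         stack = []
--     return stacks
-- ===== SOURCE B (Python) =====
-- def stackloader(stacklines, positions):
--     # One row-major pass: pre-allocate all stacks, sweep reversed lines once,
--     # distributing each line's letters to every stack simultaneously.
--     stacks = [[] for _ in positions]
--     for line in reversed(stacklines):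
--         stacks = [stack + [ch for ch in line[p] if ch.isalpha()]
--                   for stack, p in zip(stacks, positions)]
--     return stacks
-- ===== Notes on version B (the rewrite author's own statement) =====
-- stated objective: alternative
-- what changed: B builds all stacks in one row-major sweep over reversed(stacklines), distributing each line's letters to every stack via zip, instead of A's column-major rebuild of one full stack per position.
import Mathlib
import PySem

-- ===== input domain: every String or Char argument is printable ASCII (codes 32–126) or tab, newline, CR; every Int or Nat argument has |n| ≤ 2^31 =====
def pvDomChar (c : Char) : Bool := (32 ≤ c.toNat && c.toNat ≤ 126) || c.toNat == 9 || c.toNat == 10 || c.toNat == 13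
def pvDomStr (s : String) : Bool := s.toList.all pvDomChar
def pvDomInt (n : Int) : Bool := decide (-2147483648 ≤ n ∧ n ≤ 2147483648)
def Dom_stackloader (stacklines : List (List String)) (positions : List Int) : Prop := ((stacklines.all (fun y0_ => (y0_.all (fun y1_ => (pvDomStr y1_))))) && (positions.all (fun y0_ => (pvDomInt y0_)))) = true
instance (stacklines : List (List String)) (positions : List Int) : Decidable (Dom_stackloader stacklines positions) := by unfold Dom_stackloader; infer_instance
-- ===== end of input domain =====

-- B builds all stacks in one row-major sweep over reversed(stacklines) via zip, instead of
-- A's column-major rebuild of one full stack per position (alternative decomposition, same cost).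

-- ===== PORT A =====
-- line[position] is PySem.List.pyGet?; its `none` (IndexError) is excluded by Pre_ below, so
-- the total form `.getD ""` is exact on Pre_. `for str in line[position]` yields one-char
-- strings; `str.isalpha()` on a one-char string is PySem.Chars.isalpha of its character.
def stackloader (stacklines : List (List String)) (positions : List Int) : List (List String) :=
  positions.foldl
    (fun sts p =>
      let stack := stacklines.reverse.foldl
        (fun stack line =>
          ((PySem.List.pyGet? line p).getD "").toList.foldl
            (fun st c => if PySem.Chars.isalpha c then st ++ [String.singleton c] else st)
            stack)
        []
      sts ++ [stack])
    []

-- ===== PORT B =====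
-- the letters of line[p], as one-char strings (B's list comprehension); same Pre_ note as A's port
def pvAlphaAt (line : List String) (p : Int) : List String :=
  (((PySem.List.pyGet? line p).getD "").toList.filter (fun c => PySem.Chars.isalpha c)).map String.singleton

def stackloader_alt (stacklines : List (List String)) (positions : List Int) : List (List String) :=
  stacklines.reverse.foldl
    (fun sts line => List.zipWith (fun st p => st ++ pvAlphaAt line p) sts positions)
    (positions.map (fun _ => ([] : List String)))

-- ===== PRECONDITION & SPEC =====
-- Pre_ excludes exactly the inputs where Python A raises IndexError: some position out of
-- range (Python negative-index rule) for some line. B raises IndexError on the same inputs.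
def Pre_stackloader (stacklines : List (List String)) (positions : List Int) : Prop :=
  ∀ line ∈ stacklines, ∀ p ∈ positions, PySem.Raise.InRange line.length p
instance (stacklines : List (List String)) (positions : List Int) : Decidable (Pre_stackloader stacklines positions) := by unfold Pre_stackloader; infer_instance

def pvWitness_stackloader : List (List String) × List Int := ([["[A]", "[B]"], ["[C]", "[D]"]], [0, 1])

def Spec_stackloader (stacklines : List (List String)) (positions : List Int) (out : List (List String)) : Prop := out = stackloader_alt stacklines positions
instance (stacklines : List (List String)) (positions : List Int) (out : List (List String)) : Decidable (Spec_stackloader stacklines positions out) := by unfold Spec_stackloader; infer_instance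

-- ===== CLAIM (what is proved, stated in full; the proofs are below) =====
def Claim_equal_stackloader : Prop := ∀ (stacklines : List (List String)) (positions : List Int), Dom_stackloader stacklines positions → Pre_stackloader stacklines positions → Spec_stackloader stacklines positions (stackloader stacklines positions)

-- ===== LEMMAS AND PROOFS =====

-- A's value: for each position, the letters of that column, bottom line first
theorem stackloader_eq_map (stacklines : List (List String)) (positions : List Int) :
    stackloader stacklines positions
      = positions.map (fun p => stacklines.reverse.flatMap (fun line => pvAlphaAt line p)) := by
  unfold stackloader pvAlphaAt
  simp only [PySem.List.foldl_append_if, PySem.List.foldl_append_eq_flatMap, List.nil_append]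
  exact Eq.symm List.map_eq_flatMap

theorem zipWith_left_of_length_eq {α β : Type} (as : List α) (bs : List β)
    (h : as.length = bs.length) : List.zipWith (fun a _ => a) as bs = as := by
  induction as generalizing bs with
  | nil => simp
  | cons a as ih => cases bs <;> simp_all

theorem zipWith_zipWith_same {α β γ δ : Type} (f : γ → β → δ) (g : α → β → γ)
    (as : List α) (bs : List β) :
    List.zipWith f (List.zipWith g as bs) bs
      = List.zipWith (fun a b => f (g a b) b) as bs := by
  induction as generalizing bs with
  | nil => simp
  | cons a as ih => cases bs <;> simp_all

theorem zipWith_map_left_self {α β : Type} (F : β → α → β) (g : α → β) (ps : List α) :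
    List.zipWith F (ps.map g) ps = ps.map (fun p => F (g p) p) := by
  induction ps with
  | nil => simp
  | cons p ps ih => simp [ih]

-- B's loop invariant: the row-major fold appends, to every stack, that position's letters
-- from all remaining lines
theorem alt_fold_eq (L : List (List String)) (positions : List Int)
    (sts : List (List String)) (h : sts.length = positions.length) :
    L.foldl (fun sts line => List.zipWith (fun st p => st ++ pvAlphaAt line p) sts positions) sts
      = List.zipWith (fun st p => st ++ L.flatMap (fun line => pvAlphaAt line p)) sts positions := by
  induction L generalizing sts with
  | nil =>
    simp only [List.foldl_nil, List.flatMap_nil, List.append_nil]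
    exact (zipWith_left_of_length_eq sts positions h).symm
  | cons line L ih =>
    rw [List.foldl_cons, ih _ (by simp [h]), zipWith_zipWith_same]
    simp [List.append_assoc]

theorem alt_eq_map (stacklines : List (List String)) (positions : List Int) :
    stackloader_alt stacklines positions
      = positions.map (fun p => stacklines.reverse.flatMap (fun line => pvAlphaAt line p)) := by
  unfold stackloader_alt
  rw [alt_fold_eq _ _ _ (by simp), zipWith_map_left_self]
  simp

-- ===== VERDICT (by name: the statement is the Claim_ definition above) =====
theorem stackloader_spec : Claim_equal_stackloader := by
  intro stacklines positions _ _
  unfold Spec_stackloader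
  rw [stackloader_eq_map, alt_eq_map]
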